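-- pv_equiv track=rewrite | github.com/AlexanderBedrosyan/Programming-Advanced-with-Python | Modules - Lab/triangle/triangle_printer.py | print_triangle
-- ===== SOURCE A (Python) =====
-- def print_triangle(size):
--     result = []
--     for num in range(1, size + 1):
--         current_result = ''
--         for current_num in range(1, num + 1):
--             current_result += f'{current_num} '
--         result.append(current_result)
--     for num in range(size - 1, 0, - 1):
--         current_result = ''
--         for current_num in range(1, num + 1):
--             current_result += f'{current_num} '
--         result.append(current_result)
--     return '\n'.join(result)
-- ===== SOURCE B (Python) =====
-- def print_triangle(size):
--     asc = []
--     row = ''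
--     for num in range(1, size + 1):
--         row += f'{num} '
--         asc.append(row)
--     result = asc + asc[:-1][::-1]
--     return '\n'.join(result)
-- ===== Notes on version B (the rewrite author's own statement) =====
-- stated objective: faster
-- what changed: B builds each ascending row incrementally from the previous one (one running prefix string, each number formatted once) and produces the descending half by mirroring the already-computed rows with a slice, instead of A's two independent nested double loops that rebuild every row character by character.
import Mathlib
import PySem

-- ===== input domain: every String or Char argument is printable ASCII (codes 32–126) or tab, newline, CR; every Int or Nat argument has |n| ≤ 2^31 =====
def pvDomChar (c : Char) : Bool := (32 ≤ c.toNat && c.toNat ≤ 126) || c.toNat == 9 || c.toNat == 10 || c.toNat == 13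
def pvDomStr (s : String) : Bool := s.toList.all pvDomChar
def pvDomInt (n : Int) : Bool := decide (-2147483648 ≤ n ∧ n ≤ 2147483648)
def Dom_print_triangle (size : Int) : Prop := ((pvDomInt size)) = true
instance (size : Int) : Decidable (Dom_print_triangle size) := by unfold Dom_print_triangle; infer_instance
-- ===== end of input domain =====

-- B builds each row incrementally from the previous one and mirrors the computed
-- ascending rows instead of recomputing them with a second nested double loop (objective: faster, constant factor).

-- ===== PORT A =====
def print_triangle (size : Int) : String :=
  let result : List String := (PySem.List.pyRange 1 (size + 1) 1).foldl
    (fun result num =>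
      result ++ [(PySem.List.pyRange 1 (num + 1) 1).foldl
        (fun current_result current_num => current_result ++ (PySem.Int.toStr current_num ++ " ")) ""]) []
  let result := (PySem.List.pyRange (size - 1) 0 (-1)).foldl
    (fun result num =>
      result ++ [(PySem.List.pyRange 1 (num + 1) 1).foldl
        (fun current_result current_num => current_result ++ (PySem.Int.toStr current_num ++ " ")) ""]) result
  PySem.Str.join "\n" result

-- ===== PORT B =====
-- loop body of Source B: row += f'{num} '; asc.append(row)
def pvBStep (st : List String × String) (num : Int) : List String × String :=
  let row := st.2 ++ (PySem.Int.toStr num ++ " ")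
  (st.1 ++ [row], row)

def print_triangle_alt (size : Int) : String :=
  let st := (PySem.List.pyRange 1 (size + 1) 1).foldl pvBStep ([], "")
  let asc := st.1
  -- asc[:-1][::-1]; slicing never raises here (step -1 ≠ 0), the .getD default is unreachable
  let result := asc ++ ((PySem.List.slice? (PySem.List.slice asc none (some (-1))) none none (-1)).getD [])
  PySem.Str.join "\n" result

-- ===== PRECONDITION & SPEC =====
def Spec_print_triangle (size : Int) (out : String) : Prop := out = print_triangle_alt size
instance (size : Int) (out : String) : Decidable (Spec_print_triangle size out) := by unfold Spec_print_triangle; infer_instance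

-- ===== CLAIM (what is proved, stated in full; the proofs are below) =====
def Claim_equal_print_triangle : Prop := ∀ (size : Int), Dom_print_triangle size → Spec_print_triangle size (print_triangle size)

-- ===== LEMMAS AND PROOFS =====

-- the ascending row "1 2 … num " as A's inner loop computes it
def pvRow (num : Int) : String :=
  (PySem.List.pyRange 1 (num + 1) 1).foldl
    (fun current_result current_num => current_result ++ (PySem.Int.toStr current_num ++ " ")) ""

lemma pvRow_succ (a : Int) (h : 0 ≤ a) :
    pvRow (a + 1) = pvRow a ++ (PySem.Int.toStr (a + 1) ++ " ") := by
  unfold pvRow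
  rw [PySem.List.pyRange_one_succ_right (by omega : (1:Int) ≤ a + 1), List.foldl_append]
  simp

lemma pvBfold (n : Nat) : ∀ (a : Int) (acc : List String), 0 ≤ a →
    (PySem.List.pyRange (a + 1) (a + 1 + n) 1).foldl pvBStep (acc, pvRow a)
      = (acc ++ (PySem.List.pyRange (a + 1) (a + 1 + n) 1).map pvRow, pvRow (a + n)) := by
  induction n with
  | zero =>
    intro a acc _
    rw [PySem.List.pyRange_one_eq_nil (by omega)]
    simp
  | succ n ih =>
    intro a acc ha
    rw [PySem.List.pyRange_one_cons (by push_cast; omega)]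
    have hstep : pvBStep (acc, pvRow a) (a + 1) = (acc ++ [pvRow (a + 1)], pvRow (a + 1)) := by
      simp [pvBStep, pvRow_succ a ha]
    rw [List.foldl_cons, hstep]
    have h1 : a + 1 + (n + 1 : Nat) = (a + 1) + 1 + (n : Nat) := by push_cast; ring
    rw [h1, ih (a + 1) (acc ++ [pvRow (a + 1)]) (by omega)]
    rw [List.map_cons]
    congr 1
    · simp
    · congr 1; omega

lemma pvAsc (size : Int) :
    (PySem.List.pyRange 1 (size + 1) 1).foldl pvBStep ([], "")
      = ((PySem.List.pyRange 1 (size + 1) 1).map pvRow, pvRow (max size 0)) := by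
  have h0 : pvRow 0 = "" := by
    unfold pvRow; rw [PySem.List.pyRange_one_eq_nil (by omega)]; rfl
  by_cases h : size ≤ 0
  · rw [PySem.List.pyRange_one_eq_nil (by omega)]
    simp [h0, max_eq_right h]
  · have hn : size + 1 = (0:Int) + 1 + size.toNat := by omega
    have h2 := pvBfold size.toNat 0 [] le_rfl
    rw [← hn] at h2
    simp only [zero_add, List.nil_append] at h2
    rw [← h0, h2]
    have h3 : ((size.toNat : Int)) = max size 0 := by omega
    rw [h3]

theorem pv_main (size : Int) : print_triangle size = print_triangle_alt size := by
  unfold print_triangle print_triangle_alt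
  rw [pvAsc size]
  simp only [PySem.List.foldl_append_singleton_eq_map, List.nil_append,
    PySem.List.slice_to_neg_one, PySem.List.slice?_none_none_neg_one, Option.getD_some]
  congr 1
  rw [PySem.List.pyRange_neg_one_eq_reverse, zero_add]
  have h1 : size - 1 + 1 = size := by ring
  rw [h1]
  by_cases h : size ≤ 0
  · rw [PySem.List.pyRange_one_eq_nil (show size + 1 ≤ 1 by omega),
        PySem.List.pyRange_one_eq_nil (show size ≤ 1 by omega)]
    simp
  · rw [PySem.List.pyRange_one_succ_right (show (1:Int) ≤ size by omega)]
    simp only [List.map_append, List.map_cons, List.map_nil, List.dropLast_concat, List.map_reverse]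
    rfl

-- ===== VERDICT (by name: the statement is the Claim_ definition above) =====
theorem print_triangle_spec : Claim_equal_print_triangle := by
  intro size _
  unfold Spec_print_triangle
  exact pv_main size
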